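-- pv_equiv track=rewrite | github.com/SabaKathawala/Assignment3_ML | test/MSCandidate_gen_SPM.py | MSseqFirst
-- ===== SOURCE A (Python) =====
-- def MSseqFirst(seq, MS):
--     size = len(seq)
--     temp = []
--     if size == 1:
--         for each in seq[0]:
--             temp.append(MS[each])
--     else:
--         for each in seq:
--             if len(each) == 1:
--                 temp.append(MS[each[0]])
--             else:
--                 for every in each:
--                     temp.append(MS[every])
--
--     if min(temp) == temp[0]:
--         if temp.count(temp[0]) == 1:
--             return True
--
--     return False
-- ===== SOURCE B (Python) =====
-- def MSseqFirst(seq, MS):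
--     # Stream the MS values of the flattened sequence instead of building a list
--     # and scanning it twice with min() and count(): True iff every later value
--     # is strictly greater than the first one.
--     values = (MS[x] for sub in seq for x in sub)
--     first = next(values)
--     return all(v > first for v in values)
-- ===== Notes on version B (the rewrite author's own statement) =====
-- stated objective: simpler
-- what changed: Instead of materialising temp (with a size==1/len==1 case split) and then scanning it twice via min() and count(), B streams the flattened MS values once, keeping only the first value and returning True iff every later value is strictly greater.
import Mathlib
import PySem

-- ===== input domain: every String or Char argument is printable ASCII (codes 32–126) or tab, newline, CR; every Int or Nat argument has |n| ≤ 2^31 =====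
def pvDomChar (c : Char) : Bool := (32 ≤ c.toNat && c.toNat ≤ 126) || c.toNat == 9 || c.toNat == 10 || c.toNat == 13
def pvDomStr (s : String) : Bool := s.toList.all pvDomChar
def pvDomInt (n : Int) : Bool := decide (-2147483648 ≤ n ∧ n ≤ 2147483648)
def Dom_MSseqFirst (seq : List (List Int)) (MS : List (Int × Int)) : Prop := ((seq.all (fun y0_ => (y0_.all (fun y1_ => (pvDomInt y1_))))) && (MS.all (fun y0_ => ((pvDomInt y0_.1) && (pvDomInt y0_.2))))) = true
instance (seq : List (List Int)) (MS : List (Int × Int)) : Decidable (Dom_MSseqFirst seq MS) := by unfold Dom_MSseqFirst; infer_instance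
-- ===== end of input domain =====

-- B streams the flattened MS values once (first value + strict-greater check) instead of
-- building temp with a size==1/len==1 case split and scanning it with min() and count(); simpler.


-- ===== PORT A =====
def MSseqFirst (seq : List (List Int)) (MS : List (Int × Int)) : Bool :=
  let d := PySem.Dict.mk MS        -- MS is a dict; lookups are total under Pre_ (every key present)
  let size := seq.length
  let temp : List Int :=
    if size = 1 then
      -- seq[0] is safe: size == 1 means seq is nonempty
      (seq.headD []).foldl (fun t each => t ++ [d.getD each 0]) []
    else
      seq.foldl (fun t each =>
        if each.length = 1 then
          -- each[0] is safe: len(each) == 1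
          t ++ [d.getD (each.headD 0) 0]
        else
          each.foldl (fun t2 every => t2 ++ [d.getD every 0]) t) []
  -- min(temp) / temp[0] raise on empty temp; excluded by Pre_
  match PySem.List.min? temp (fun x => x), temp.head? with
  | some m, some h =>
      if m = h then (if PySem.List.count temp h = 1 then true else false) else false
  | _, _ => false

-- ===== PORT B =====
def MSseqFirst_alt (seq : List (List Int)) (MS : List (Int × Int)) : Bool :=
  let d := PySem.Dict.mk MS
  match seq.flatMap id with
  | [] => false        -- Python B raises StopIteration here; excluded by Pre_
  | x :: rest =>
    let first := d.getD x 0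
    rest.all (fun y => decide (first < d.getD y 0))

-- ===== PRECONDITION & SPEC =====
-- Pre_ excludes exactly the inputs where A raises: an empty flattened sequence
-- (min([]) is a ValueError) or an element that is not a key of MS (KeyError).
def Pre_MSseqFirst (seq : List (List Int)) (MS : List (Int × Int)) : Prop :=
  seq.flatMap id ≠ [] ∧ ((seq.flatMap id).all (fun x => (PySem.Dict.mk MS).contains x)) = true
instance (seq : List (List Int)) (MS : List (Int × Int)) : Decidable (Pre_MSseqFirst seq MS) := by
  unfold Pre_MSseqFirst; infer_instance
def pvWitness_MSseqFirst : List (List Int) × (List (Int × Int)) := ([[0], [1]], [(0, 1), (1, 2)])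

def Spec_MSseqFirst (seq : List (List Int)) (MS : List (Int × Int)) (out : Bool) : Prop := out = MSseqFirst_alt seq MS
instance (seq : List (List Int)) (MS : List (Int × Int)) (out : Bool) : Decidable (Spec_MSseqFirst seq MS out) := by unfold Spec_MSseqFirst; infer_instance

-- ===== CLAIM (what is proved, stated in full; the proofs are below) =====
def Claim_equal_MSseqFirst : Prop := ∀ (seq : List (List Int)) (MS : List (Int × Int)), Dom_MSseqFirst seq MS → Pre_MSseqFirst seq MS → Spec_MSseqFirst seq MS (MSseqFirst seq MS)

-- ===== LEMMAS AND PROOFS =====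

-- A's temp is always (seq.flatMap id).map f, whatever branch is taken.
theorem temp_inner (d : PySem.Dict Int Int) (each : List Int) (t : List Int) :
    each.foldl (fun t2 every => t2 ++ [d.getD every 0]) t = t ++ each.map (fun x => d.getD x 0) := by
  induction each generalizing t with
  | nil => simp
  | cons y ys ih => simp [ih, List.append_assoc]

theorem temp_outer (d : PySem.Dict Int Int) (seq : List (List Int)) (t : List Int) :
    seq.foldl (fun t each =>
        if each.length = 1 then t ++ [d.getD (each.headD 0) 0]
        else each.foldl (fun t2 every => t2 ++ [d.getD every 0]) t) t
      = t ++ (seq.flatMap id).map (fun x => d.getD x 0) := by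
  induction seq generalizing t with
  | nil => simp
  | cons each rest ih =>
    have hstep : (if each.length = 1 then t ++ [d.getD (each.headD 0) 0]
        else each.foldl (fun t2 every => t2 ++ [d.getD every 0]) t)
        = t ++ each.map (fun x => d.getD x 0) := by
      split
      · next h1 =>
        match each, h1 with
        | [x], _ => simp
      · exact temp_inner d each t
    simp only [List.foldl_cons, hstep, ih, List.flatMap_cons, id, List.map_append,
      List.append_assoc]

-- the trailing min/count test on a nonempty list h :: t equals "every later value is strictly greater"
theorem tail_test (h : Int) (t : List Int) :
    (if t.foldl min h = h then (if (h :: t).count h = 1 then true else false) else false)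
      = t.all (fun y => decide (h < y)) := by
  have hm : (PySem.List.min? (h :: t) (fun y => y)) = some (t.foldl min h) :=
    PySem.List.min?_id_cons h t
  have hmem : t.foldl min h ∈ h :: t := PySem.List.min?_mem hm
  have hlow : ∀ y ∈ h :: t, t.foldl min h ≤ y := fun y hy => PySem.List.min?_isMin hm y hy
  by_cases hall : ∀ y ∈ t, h < y
  · have hmh : t.foldl min h = h := by
      rcases List.mem_cons.mp hmem with he | hmt
      · exact he
      · exact le_antisymm (hlow h List.mem_cons_self) (le_of_lt (hall _ hmt))
    have hcnt : (h :: t).count h = 1 := by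
      rw [List.count_cons_self, List.count_eq_zero.mpr (fun hc => lt_irrefl h (hall h hc))]
    rw [hmh, hcnt]
    simpa [List.all_eq_true] using fun y hy => hall y hy
  · push Not at hall
    obtain ⟨y, hy, hyle⟩ := hall
    have hrhs : t.all (fun y => decide (h < y)) = false := by
      simp only [List.all_eq_false]
      exact ⟨y, hy, by simpa using not_lt.mpr hyle⟩
    rw [hrhs]
    split
    · next hmh =>
      have h1 : t.foldl min h ≤ y := hlow y (List.mem_cons_of_mem _ hy)
      have h2 : y ≤ t.foldl min h := by rw [hmh]; exact hyle
      have hht : h ∈ t := by rwa [(le_antisymm h2 h1).trans hmh] at hy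
      have h3 : 0 < t.count h := List.count_pos_iff.mpr hht
      have h4 : ¬ ((h :: t).count h = 1) := by rw [List.count_cons_self]; omega
      rw [if_neg h4]
    · rfl

-- ===== VERDICT (by name: the statement is the Claim_ definition above) =====
theorem MSseqFirst_spec : Claim_equal_MSseqFirst := by
  intro seq MS _ hpre
  obtain ⟨hne, -⟩ := hpre
  unfold Spec_MSseqFirst MSseqFirst MSseqFirst_alt
  set d := PySem.Dict.mk MS with hd
  set f : Int → Int := fun x => d.getD x 0 with hf
  -- temp = (seq.flatMap id).map f in both branches of A
  have htemp : (if seq.length = 1 then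
        (seq.headD []).foldl (fun t each => t ++ [d.getD each 0]) []
      else
        seq.foldl (fun t each =>
          if each.length = 1 then t ++ [d.getD (each.headD 0) 0]
          else each.foldl (fun t2 every => t2 ++ [d.getD every 0]) t) [])
      = (seq.flatMap id).map f := by
    split
    · next h1 =>
      match seq, h1 with
      | [s0], _ => simpa using temp_inner d s0 []
    · simpa using temp_outer d seq []
  simp only [htemp]
  obtain ⟨s, rest, hflat⟩ : ∃ s rest, seq.flatMap id = s :: rest := by
    cases hc : seq.flatMap id with
    | nil => exact absurd hc hne
    | cons s rest => exact ⟨s, rest, rfl⟩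
  rw [hflat]
  simp only [List.map_cons, PySem.List.min?_id_cons, List.head?_cons, PySem.List.count_eq]
  exact (tail_test (f s) (rest.map f)).trans (by simp [List.all_map, Function.comp_def, hf])

-- Dom/Pre hold at the witness
theorem pvWitness_ok : Dom_MSseqFirst pvWitness_MSseqFirst.1 pvWitness_MSseqFirst.2 ∧
    Pre_MSseqFirst pvWitness_MSseqFirst.1 pvWitness_MSseqFirst.2 := by decide
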